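-- pv_equiv track=rewrite | github.com/Bennyhwanggggg/Algorithm-and-Data-Structures-and-Coding-Challenges | Challenges/longestRepeatingSubstring.py | search
-- ===== SOURCE A (Python) =====
-- def search(length: int, n: int, S: str) -> str:
--     """
--     Search a substring of given length
--     that occurs at least 2 times.
--     @return start position if the substring exits and -1 otherwise.
--     """
--     seen = set()
--     for start in range(0, n - length + 1):
--         tmp = S[start:start + length]
--         if tmp in seen:
--             return start
--         seen.add(tmp)
--     return -1
-- ===== SOURCE B (Python) =====
-- def search(length: int, n: int, S: str) -> str:
--     """Rabin-Karp scan: an exact base-131 polynomial rolling hash over the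
--     length-`length` windows of S (n == len(S)).  Python big ints make the
--     hash injective for characters with code < 131, so a hash repeat is a
--     substring repeat and no verification is needed."""
--     base = 131
--     windows = n - length + 1
--     if windows <= 0:
--         return -1
--     h = 0
--     for i in range(length):
--         h = h * base + ord(S[i])
--     msd = base ** (length - 1)
--     seen = {h}
--     for start in range(1, windows):
--         h = (h - ord(S[start - 1]) * msd) * base + ord(S[start + length - 1])
--         if h in seen:
--             return start
--         seen.add(h)
--     return -1
-- ===== Notes on version B (the rewrite author's own statement) =====
-- stated objective: alternative
-- what changed: Replaces A's per-window slicing plus a set of seen substrings with a Rabin-Karp scan: an exact (injective, collision-free) base-131 big-int rolling hash, updated in O(1) big-int ops per window; Pre_ admits all inputs with at most one window that fits (both return -1) and otherwise the natural domain 1 <= length and n <= len(S) (n is documented as the length of S) — outside it A's values come from Python's clamped/negative slicing and B's direct indexing raises.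
-- outside the precondition, e.g. on search(2, 6, 'abc'): A returns 4, B raises IndexError; on search(-1, 3, 'abc'): A returns 2, B raises IndexError
import Mathlib
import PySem

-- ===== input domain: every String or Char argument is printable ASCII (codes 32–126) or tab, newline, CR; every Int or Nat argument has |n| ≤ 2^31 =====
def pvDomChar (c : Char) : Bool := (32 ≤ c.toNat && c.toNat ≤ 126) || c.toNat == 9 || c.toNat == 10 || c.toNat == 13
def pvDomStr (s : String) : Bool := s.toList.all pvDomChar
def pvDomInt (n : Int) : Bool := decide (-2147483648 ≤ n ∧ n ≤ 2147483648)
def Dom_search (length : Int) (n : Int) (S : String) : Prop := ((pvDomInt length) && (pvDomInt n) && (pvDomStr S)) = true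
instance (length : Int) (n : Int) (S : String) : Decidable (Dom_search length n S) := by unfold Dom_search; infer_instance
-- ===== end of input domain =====

-- B replaces A's per-window slicing + set of seen substrings with an exact (injective, hence
-- collision-free) base-131 big-int rolling hash over the windows: an alternative algorithm.

-- ===== PORT A =====
-- the 'for start in range(0, n - length + 1)' loop with early return (range is lazy: ported
-- as a counter with the trip count as fuel); seen is a Python set of strings
-- (the string S is handled as its character list; PySem string slicing is defined on it)
def searchLoopA (length : Int) (cs : List Char) :
    Nat → Int → PySem.Set (List Char) → Int
  | 0, _, _ => -1
  | fuel + 1, start, seen =>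
    let tmp := PySem.List.slice cs (some start) (some (start + length))
    if PySem.Set.contains seen tmp then start
    else searchLoopA length cs fuel (start + 1) (PySem.Set.add seen tmp)

def search (length : Int) (n : Int) (S : String) : Int :=
  searchLoopA length S.toList (n - length + 1).toNat 0 PySem.Set.empty

-- ===== PORT B =====
-- the 'for start in range(1, windows)' loop of Source B, same lazy-range porting; h is the
-- rolling hash, seen a Python set of ints; 'some start' is the early return, 'none' means
-- the loop fell through.  Source B indexes S[i] directly (IndexError out of range); under
-- Pre_search every index is in range, so pyGetD with a dummy default is exact there.
def searchLoopB (cs : List Char) (length msd : Int) :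
    Nat → Int → Int → PySem.Set Int → Option Int
  | 0, _, _, _ => none
  | fuel + 1, start, h, seen =>
    let h' := (h - ((PySem.List.pyGetD cs (start - 1) ' ').toNat : Int) * msd) * 131
                + ((PySem.List.pyGetD cs (start + length - 1) ' ').toNat : Int)
    if PySem.Set.contains seen h' then some start
    else searchLoopB cs length msd fuel (start + 1) h' (PySem.Set.add seen h')

def search_alt (length : Int) (n : Int) (S : String) : Int :=
  let windows := n - length + 1
  if windows ≤ 0 then -1
  else
    -- h = hash of the first window, built with 'for i in range(length)'
    let h := (PySem.List.pyRange 0 length 1).foldl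
        (fun h i => h * 131 + ((PySem.List.pyGetD S.toList i ' ').toNat : Int)) 0
    -- msd = base ** (length - 1); exact since Pre_ gives 1 ≤ length
    let msd : Int := 131 ^ (length - 1).toNat
    match searchLoopB S.toList length msd (windows - 1).toNat 1 h
        (PySem.Set.add PySem.Set.empty h) with
    | some v => v
    | none => -1

-- ===== PRECONDITION & SPEC =====
-- Pre_ admits every input with no window (both return -1 immediately), every input with a
-- single window that fits in S (it cannot repeat: both return -1) and otherwise restricts
-- to the function's natural domain:
-- 1 ≤ length (a substring length) and n ≤ len(S) (n is documented as the length of S).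
-- Outside it A's returned values come from Python's clamped/negative slicing, and B's
-- direct character indexing raises.
def Pre_search (length : Int) (n : Int) (S : String) : Prop :=
  n - length + 1 ≤ 0 ∨ (n ≤ length ∧ length ≤ PySem.Str.len S) ∨ (1 ≤ length ∧ n ≤ PySem.Str.len S)
instance (length : Int) (n : Int) (S : String) : Decidable (Pre_search length n S) := by
  unfold Pre_search; infer_instance

def pvWitness_search : Int × Int × String := (1, 4, "abca")

def Spec_search (length : Int) (n : Int) (S : String) (out : Int) : Prop := out = search_alt length n S
instance (length : Int) (n : Int) (S : String) (out : Int) : Decidable (Spec_search length n S out) := by unfold Spec_search; infer_instance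

-- ===== CLAIM (what is proved, stated in full; the proofs are below) =====
def Claim_equal_search : Prop := ∀ (length : Int) (n : Int) (S : String), Dom_search length n S → Pre_search length n S → Spec_search length n S (search length n S)

-- ===== LEMMAS AND PROOFS =====

def pvEnc (t : List Char) : Int := t.foldl (fun a c => a * 131 + (c.toNat : Int)) 0

theorem pvEnc_acc (t : List Char) (a : Int) :
    t.foldl (fun a c => a * 131 + (c.toNat : Int)) a = a * 131 ^ t.length + pvEnc t := by
  induction t generalizing a with
  | nil => simp [pvEnc]
  | cons c t ih =>
    simp only [List.foldl_cons, List.length_cons, pvEnc]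
    rw [ih, ih (0 * 131 + (c.toNat : Int))]
    ring

theorem pvEnc_cons (c : Char) (t : List Char) :
    pvEnc (c :: t) = (c.toNat : Int) * 131 ^ t.length + pvEnc t := by
  simp only [pvEnc, List.foldl_cons, zero_mul, zero_add]
  exact pvEnc_acc t _

theorem pvEnc_snoc (t : List Char) (c : Char) :
    pvEnc (t ++ [c]) = pvEnc t * 131 + (c.toNat : Int) := by
  simp [pvEnc, List.foldl_append]

theorem pvEnc_nonneg (t : List Char) : 0 ≤ pvEnc t := by
  induction t with
  | nil => simp [pvEnc]
  | cons c t ih => rw [pvEnc_cons]; positivity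

theorem pvEnc_lt (t : List Char) (h : ∀ c ∈ t, c.toNat < 131) :
    pvEnc t < 131 ^ t.length := by
  induction t with
  | nil => simp [pvEnc]
  | cons c t ih =>
    rw [pvEnc_cons]
    have h1 : pvEnc t < 131 ^ t.length := ih (fun c hc => h c (List.mem_cons_of_mem _ hc))
    have h2 : (c.toNat : Int) ≤ 130 := by
      have := h c (List.mem_cons_self ..); omega
    have hP : (0:Int) < 131 ^ t.length := by positivity
    calc (c.toNat : Int) * 131 ^ t.length + pvEnc t
        < (c.toNat : Int) * 131 ^ t.length + 131 ^ t.length := by omega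
      _ = ((c.toNat : Int) + 1) * 131 ^ t.length := by ring
      _ ≤ 131 * 131 ^ t.length := by
          apply mul_le_mul_of_nonneg_right (by omega) (le_of_lt hP)
      _ = 131 ^ (t.length + 1) := by ring

theorem pvEnc_inj (t u : List Char) (hlen : t.length = u.length)
    (ht : ∀ c ∈ t, c.toNat < 131) (hu : ∀ c ∈ u, c.toNat < 131)
    (he : pvEnc t = pvEnc u) : t = u := by
  induction t generalizing u with
  | nil => cases u with
    | nil => rfl
    | cons d u => simp at hlen
  | cons c t ih =>
    cases u with
    | nil => simp at hlen
    | cons d u =>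
      simp only [List.length_cons, Nat.add_right_cancel_iff] at hlen
      rw [pvEnc_cons, pvEnc_cons, hlen] at he
      have hP : (0:Int) < 131 ^ u.length := by positivity
      have h1 : pvEnc t < 131 ^ u.length := hlen ▸ pvEnc_lt t (fun x hx => ht x (List.mem_cons_of_mem _ hx))
      have h2 : pvEnc u < 131 ^ u.length := pvEnc_lt u (fun x hx => hu x (List.mem_cons_of_mem _ hx))
      have h3 := pvEnc_nonneg t
      have h4 := pvEnc_nonneg u
      have hcd : (c.toNat : Int) = (d.toNat : Int) := by
        rcases lt_trichotomy (c.toNat : Int) (d.toNat : Int) with h | h | h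
        · nlinarith
        · exact h
        · nlinarith
      have hcd' : c = d := by
        have : c.toNat = d.toNat := by exact_mod_cast hcd
        exact Char.ext (UInt32.toNat_inj.mp this)
      subst hcd'
      rw [hcd] at he
      have h5 : pvEnc t = pvEnc u := by omega
      rw [ih u hlen (fun x hx => ht x (List.mem_cons_of_mem _ hx))
        (fun x hx => hu x (List.mem_cons_of_mem _ hx)) h5]

def pvWin (cs : List Char) (L s : Nat) : List Char := (cs.drop s).take L

theorem pvWin_length (cs : List Char) (L s : Nat) (h : s + L ≤ cs.length) :
    (pvWin cs L s).length = L := by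
  simp [pvWin]; omega

theorem pvWin_subset (cs : List Char) (L s : Nat) : ∀ c ∈ pvWin cs L s, c ∈ cs := by
  intro c hc
  exact List.mem_of_mem_drop (List.mem_of_mem_take hc)

theorem pvWin_cons (cs : List Char) (L s : Nat) (hL : 1 ≤ L) (h : s < cs.length) :
    pvWin cs L s = cs[s] :: (cs.drop (s + 1)).take (L - 1) := by
  unfold pvWin
  cases L with
  | zero => omega
  | succ L =>
    rw [List.drop_eq_getElem_cons h, List.take_succ_cons]
    simp

theorem pvWin_snoc (cs : List Char) (L s : Nat) (hL : 1 ≤ L) (h : s + L ≤ cs.length) :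
    pvWin cs L s = (cs.drop s).take (L - 1) ++ [cs[s + L - 1]'(by omega)] := by
  obtain ⟨M, rfl⟩ : ∃ M, L = M + 1 := ⟨L - 1, by omega⟩
  unfold pvWin
  rw [List.take_add_one]
  simp only [Nat.add_sub_cancel]
  congr 1
  have hidx : M < (cs.drop s).length := by simp; omega
  rw [List.getElem?_eq_getElem hidx]
  simp [List.getElem_drop]

theorem pvRoll (cs : List Char) (L s : Nat) (hL : 1 ≤ L) (h : s + 1 + L ≤ cs.length) :
    pvEnc (pvWin cs L (s + 1)) =
      (pvEnc (pvWin cs L s) - (cs.getD s ' ').toNat * 131 ^ (L - 1)) * 131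
        + ((cs.getD (s + L) ' ').toNat : Int) := by
  have h1 : pvWin cs L s = cs[s]'(by omega) :: (cs.drop (s + 1)).take (L - 1) :=
    pvWin_cons cs L s hL (by omega)
  have h2 : pvWin cs L (s + 1) = (cs.drop (s + 1)).take (L - 1) ++ [cs[s + L]'(by omega)] := by
    have := pvWin_snoc cs L (s + 1) hL (by omega)
    rw [this]
    have heq : s + 1 + L - 1 = s + L := by omega
    simp [heq]
  have hmidlen : ((cs.drop (s + 1)).take (L - 1)).length = L - 1 := by simp; omega
  rw [h2, pvEnc_snoc, h1, pvEnc_cons, hmidlen]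
  rw [List.getD_eq_getElem _ _ (by omega), List.getD_eq_getElem _ _ (by omega)]
  ring

theorem pvInitAux (cs : List Char) (L : Nat) (hL : L ≤ cs.length) :
    (List.range L).foldl (fun h k => h * 131 + ((cs.getD k ' ').toNat : Int)) 0
      = pvEnc (cs.take L) := by
  induction L with
  | zero => simp [pvEnc]
  | succ L ih =>
    rw [List.range_succ, List.foldl_append, ih (by omega), List.take_add_one]
    rw [List.getElem?_eq_getElem (by omega : L < cs.length)]
    simp only [Option.toList_some, List.foldl_cons, List.foldl_nil]
    rw [pvEnc_snoc, List.getD_eq_getElem _ _ (by omega)]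

theorem pvInit (cs : List Char) (L : Nat) (hL : L ≤ cs.length) :
    (PySem.List.pyRange 0 (L : Int) 1).foldl
        (fun h i => h * 131 + ((PySem.List.pyGetD cs i ' ').toNat : Int)) 0
      = pvEnc (pvWin cs L 0) := by
  have h0 : pvWin cs L 0 = cs.take L := by simp [pvWin]
  rw [h0, ← pvInitAux cs L hL, PySem.List.pyRange_zero_nat, List.foldl_map]
  simp

-- main loop correspondence over the windows, from any start s ∈ [1, W];
-- both loops have remaining fuel W - s
theorem pvLoops (cs : List Char) (L W : Nat) (hL : 1 ≤ L)
    (hWm : W + L ≤ cs.length + 1) (hdig : ∀ c ∈ cs, c.toNat < 131) :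
    ∀ (k s : Nat), W - s = k → 1 ≤ s → s ≤ W →
    ∀ (seenA : PySem.Set (List Char)) (seenB : PySem.Set Int),
    (∀ t, t ∈ seenA ↔ ∃ j, j < s ∧ t = pvWin cs L j) →
    (∀ x, x ∈ seenB ↔ ∃ j, j < s ∧ x = pvEnc (pvWin cs L j)) →
    searchLoopA (L : Int) cs (W - s) (s : Int) seenA
      = (match searchLoopB cs (L : Int) (131 ^ (L - 1))
            (W - s) (s : Int) (pvEnc (pvWin cs L (s - 1))) seenB with
        | some v => v
        | none => -1) := by
  intro k
  induction k with
  | zero =>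
    intro s hWs hs1 hsW seenA seenB hA hB
    rw [hWs]
    rfl
  | succ k ih =>
    intro s hWs hs1 hsW seenA seenB hA hB
    have hsW' : s < W := by omega
    have hsL : s + L ≤ cs.length := by omega
    rw [show W - s = k + 1 from hWs]
    simp only [searchLoopA, searchLoopB]
    have htmp : PySem.List.slice cs (some (s : Int)) (some ((s : Int) + (L : Int)))
        = pvWin cs L s := PySem.List.slice_natCast_add cs s L
    have hidx1 : ((s : Int) - 1) = (((s - 1 : Nat)) : Int) := by omega
    have hidx2 : ((s : Int) + (L : Int) - 1) = (((s - 1 + L : Nat)) : Int) := by omega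
    have hroll : (pvEnc (pvWin cs L (s - 1))
          - ((PySem.List.pyGetD cs ((s : Int) - 1) ' ').toNat : Int) * 131 ^ (L - 1)) * 131
          + ((PySem.List.pyGetD cs ((s : Int) + (L : Int) - 1) ' ').toNat : Int)
        = pvEnc (pvWin cs L s) := by
      rw [hidx1, hidx2, PySem.List.pyGetD_natCast, PySem.List.pyGetD_natCast]
      have := pvRoll cs L (s - 1) hL (by omega)
      have hs1' : s - 1 + 1 = s := by omega
      rw [hs1'] at this
      rw [← this]
    have hwinlen : ∀ j, j + L ≤ cs.length → (pvWin cs L j).length = L :=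
      fun j hj => pvWin_length cs L j hj
    have hmem : PySem.Set.contains seenA (pvWin cs L s)
        = PySem.Set.contains seenB (pvEnc (pvWin cs L s)) := by
      rw [Bool.eq_iff_iff, PySem.Set.contains_iff, PySem.Set.contains_iff, hA, hB]
      constructor
      · rintro ⟨j, hj, hje⟩
        exact ⟨j, hj, by rw [hje]⟩
      · rintro ⟨j, hj, hje⟩
        refine ⟨j, hj, ?_⟩
        apply pvEnc_inj
        · rw [hwinlen s hsL, hwinlen j (by omega)]
        · exact fun c hc => hdig c (pvWin_subset cs L s c hc)
        · exact fun c hc => hdig c (pvWin_subset cs L j c hc)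
        · exact hje
    rw [htmp, hroll, hmem]
    by_cases hc : PySem.Set.contains seenB (pvEnc (pvWin cs L s)) = true
    · rw [if_pos hc, if_pos hc]
    · rw [if_neg hc, if_neg hc]
      have hcast : ((s : Int) + 1) = (((s + 1 : Nat)) : Int) := by push_cast; ring
      rw [hcast]
      have hs1' : s + 1 - 1 = s := by omega
      have := ih (s + 1) (by omega) (by omega) (by omega)
        (PySem.Set.add seenA (pvWin cs L s))
        (PySem.Set.add seenB (pvEnc (pvWin cs L s)))
        (fun t => by
          rw [PySem.Set.mem_add, hA]
          constructor
          · rintro (⟨j, hj, hje⟩ | hje)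
            · exact ⟨j, by omega, hje⟩
            · exact ⟨s, by omega, hje⟩
          · rintro ⟨j, hj, hje⟩
            by_cases hjs : j = s
            · exact Or.inr (by rw [hje, hjs])
            · exact Or.inl ⟨j, by omega, hje⟩)
        (fun x => by
          rw [PySem.Set.mem_add, hB]
          constructor
          · rintro (⟨j, hj, hje⟩ | hje)
            · exact ⟨j, by omega, hje⟩
            · exact ⟨s, by omega, hje⟩
          · rintro ⟨j, hj, hje⟩
            by_cases hjs : j = s
            · exact Or.inr (by rw [hje, hjs])
            · exact Or.inl ⟨j, by omega, hje⟩)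
      rw [hs1', show W - (s + 1) = k from by omega] at this
      exact this

theorem search_eq (length : Int) (n : Int) (S : String)
    (hdom : pvDomStr S = true)
    (hpre : n - length + 1 ≤ 0 ∨ (n ≤ length ∧ length ≤ PySem.Str.len S)
              ∨ (1 ≤ length ∧ n ≤ PySem.Str.len S)) :
    search length n S = search_alt length n S := by
  by_cases hz : n - length + 1 ≤ 0
  case pos =>
    simp only [search, search_alt]
    rw [if_pos hz, Int.toNat_of_nonpos hz]
    rfl
  case neg =>
  by_cases hw0 : n - length + 1 ≤ 1
  case pos =>
    -- exactly one window: A scans it and finds no repeat, B's rolling loop is empty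
    have h1 : (n - length + 1).toNat = 1 := by omega
    simp only [search, search_alt]
    rw [if_neg (by omega), h1, show (n - length + 1 - 1).toNat = 0 from by omega]
    simp [searchLoopA, searchLoopB]
  case neg =>
  have hmain : 1 ≤ length ∧ n ≤ PySem.Str.len S := by
    rcases hpre with h | h | h
    · omega
    · exact absurd (by omega : n - length + 1 ≤ 1) hw0
    · exact h
  obtain h1 := hmain.1
  obtain h2 := hmain.2
  set cs := S.toList with hcs
  have hlenS : PySem.Str.len S = (cs.length : Int) := by simp [PySem.Str.len_eq, hcs]
  have hdig : ∀ c ∈ cs, c.toNat < 131 := by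
    intro c hc
    have := (List.all_eq_true.mp hdom) c hc
    simp only [pvDomChar, Bool.or_eq_true, Bool.and_eq_true, decide_eq_true_eq, beq_iff_eq] at this
    omega
  rw [hlenS] at h2
  by_cases hw : n - length + 1 ≤ 0
  · simp only [search, search_alt]
    rw [if_pos hw, Int.toNat_of_nonpos hw]
    rfl
  · rw [not_le] at hw
    set L : Nat := length.toNat with hLdef
    have hcastL : (L : Int) = length := Int.toNat_of_nonneg (by omega)
    have hL1 : 1 ≤ L := by omega
    set W : Nat := (n - length + 1).toNat with hWdef
    have hcastW : (W : Int) = n - length + 1 := Int.toNat_of_nonneg (by omega)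
    have hW1 : 1 ≤ W := by omega
    have hWm : W + L ≤ cs.length + 1 := by omega
    have hLlen : L ≤ cs.length := by omega
    simp only [search, search_alt]
    rw [if_neg (by omega), ← hcs]
    -- the initial hash is the encoding of window 0
    have hinit : (PySem.List.pyRange 0 length 1).foldl
        (fun h i => h * 131 + ((PySem.List.pyGetD cs i ' ').toNat : Int)) 0
        = pvEnc (pvWin cs L 0) := by
      rw [← hcastL]
      exact pvInit cs L hLlen
    rw [hinit]
    have hmsd : (length - 1).toNat = L - 1 := by omega
    rw [hmsd]
    -- A's trip count is W; peel the first iteration (start = 0, seen empty: never a repeat)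
    rw [show (n - length + 1).toNat = (W - 1) + 1 from by omega]
    simp only [searchLoopA]
    have htmp0 : PySem.List.slice cs (some 0) (some (0 + length)) = pvWin cs L 0 := by
      have := PySem.List.slice_natCast_add cs 0 L
      simp only [Nat.cast_zero] at this
      rw [← hcastL, this]
      simp [pvWin]
    rw [htmp0]
    have hempty : PySem.Set.contains PySem.Set.empty (pvWin cs L 0) = false := rfl
    rw [hempty]
    simp only [Bool.false_eq_true, if_false]
    have h01 : (0 : Int) + 1 = ((1 : Nat) : Int) := by norm_num
    rw [h01, ← hcastL]
    rw [show (n - (L : Int) + 1 - 1).toNat = W - 1 from by omega]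
    have := pvLoops cs L W hL1 hWm hdig (W - 1) 1 rfl (by omega) (by omega)
      (PySem.Set.add PySem.Set.empty (pvWin cs L 0))
      (PySem.Set.add PySem.Set.empty (pvEnc (pvWin cs L 0)))
      (fun t => by
        rw [PySem.Set.mem_add]
        constructor
        · rintro (h | h)
          · simp [PySem.Set.empty] at h
          · exact ⟨0, by omega, h⟩
        · rintro ⟨j, hj, hje⟩
          have : j = 0 := by omega
          exact Or.inr (this ▸ hje))
      (fun x => by
        rw [PySem.Set.mem_add]
        constructor
        · rintro (h | h)
          · simp [PySem.Set.empty] at h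
          · exact ⟨0, by omega, h⟩
        · rintro ⟨j, hj, hje⟩
          have : j = 0 := by omega
          exact Or.inr (this ▸ hje))
    simpa using this

-- ===== VERDICT (by name: the statement is the Claim_ definition above) =====
theorem search_spec : Claim_equal_search := by
  intro length n S hDom hPre
  unfold Spec_search
  have hdomS : pvDomStr S = true := by
    unfold Dom_search at hDom
    simp only [Bool.and_eq_true] at hDom
    exact hDom.2
  exact search_eq length n S hdomS hPre
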